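-- pv_equiv track=rewrite | github.com/lucaspecout/ope-protec | backend/app/services.py | _highest_vigilance_level
-- ===== SOURCE A (Python) =====
-- from typing import Any
--
-- def _highest_vigilance_level(alerts: list[dict[str, Any]]) -> str:
--     priority = {"vert": 1, "jaune": 2, "orange": 3, "rouge": 4}
--     highest = "vert"
--     highest_score = priority[highest]
--     for alert in alerts:
--         level = str(alert.get("level") or "vert").lower()
--         score = priority.get(level, 0)
--         if score > highest_score:
--             highest = level
--             highest_score = score
--     return highest
-- ===== SOURCE B (Python) =====
-- def _highest_vigilance_level(alerts):
--     levels = {str(alert.get("level") or "vert").lower() for alert in alerts}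
--     for name in ("rouge", "orange", "jaune"):
--         if name in levels:
--             return name
--     return "vert"
-- ===== Notes on version B (the rewrite author's own statement) =====
-- stated objective: simpler
-- what changed: Replaces the running-max accumulator (best level + numeric score carried through the loop) by a collect-then-probe scheme: build the set of normalized levels in one pass, then return the first of the fixed priority tuple ('rouge','orange','jaune') present, defaulting to 'vert'.
import Mathlib
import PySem

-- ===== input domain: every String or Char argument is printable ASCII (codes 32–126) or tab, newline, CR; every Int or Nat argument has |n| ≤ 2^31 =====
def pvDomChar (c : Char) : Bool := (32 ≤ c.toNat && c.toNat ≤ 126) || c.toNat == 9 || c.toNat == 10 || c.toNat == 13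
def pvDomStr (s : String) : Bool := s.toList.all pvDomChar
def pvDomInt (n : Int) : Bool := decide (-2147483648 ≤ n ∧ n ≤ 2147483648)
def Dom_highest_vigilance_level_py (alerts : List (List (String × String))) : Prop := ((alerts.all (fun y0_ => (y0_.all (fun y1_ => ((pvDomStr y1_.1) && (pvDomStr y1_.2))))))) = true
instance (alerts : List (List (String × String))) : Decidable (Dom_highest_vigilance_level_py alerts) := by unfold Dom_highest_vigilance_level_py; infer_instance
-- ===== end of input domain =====

-- B replaces A's running-max accumulator by collecting the set of normalized levels and probing
-- the fixed priority order: a simpler decomposition, same O(n) cost.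

-- ===== PORT A =====
-- shared normalization: str(alert.get("level") or "vert").lower()  (values are strings; falsy = "")
def pvNormLevel (alert : List (String × String)) : String :=
  PySem.Str.lower (match (PySem.Dict.mk alert).get? "level" with
    | some s => if s = "" then "vert" else s
    | none => "vert")

def highest_vigilance_level_py (alerts : List (List (String × String))) : String :=
  let priority : PySem.Dict String Int :=
    PySem.Dict.mk [("vert", 1), ("jaune", 2), ("orange", 3), ("rouge", 4)]
  let st := alerts.foldl (fun (st : String × Int) alert =>
    let level := pvNormLevel alert
    let score := priority.getD level 0
    if score > st.2 then (level, score) else st) ("vert", priority.getD "vert" 0)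
  st.1

-- ===== PORT B =====
def highest_vigilance_level_py_alt (alerts : List (List (String × String))) : String :=
  let levels : PySem.Set String := PySem.Set.ofList (alerts.map pvNormLevel)
  if PySem.Set.contains levels "rouge" then "rouge"
  else if PySem.Set.contains levels "orange" then "orange"
  else if PySem.Set.contains levels "jaune" then "jaune"
  else "vert"

-- ===== PRECONDITION & SPEC =====
def Spec_highest_vigilance_level_py (alerts : List (List (String × String))) (out : String) : Prop := out = highest_vigilance_level_py_alt alerts
instance (alerts : List (List (String × String))) (out : String) : Decidable (Spec_highest_vigilance_level_py alerts out) := by unfold Spec_highest_vigilance_level_py; infer_instance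

-- ===== CLAIM (what is proved, stated in full; the proofs are below) =====
def Claim_equal_highest_vigilance_level_py : Prop := ∀ (alerts : List (List (String × String))), Dom_highest_vigilance_level_py alerts → Spec_highest_vigilance_level_py alerts (highest_vigilance_level_py alerts)

-- ===== LEMMAS AND PROOFS =====

-- A's loop step, with the priority dict evaluated
def pvStep (st : String × Int) (alert : List (String × String)) : String × Int :=
  let level := pvNormLevel alert
  let score := (PySem.Dict.mk [("vert", (1:Int)), ("jaune", 2), ("orange", 3), ("rouge", 4)]).getD level 0
  if score > st.2 then (level, score) else st

theorem pvScore_eq (l : String) :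
    (PySem.Dict.mk [("vert", (1:Int)), ("jaune", 2), ("orange", 3), ("rouge", 4)]).getD l 0 =
    if l = "vert" then 1 else if l = "jaune" then 2 else if l = "orange" then 3
    else if l = "rouge" then 4 else 0 := by
  by_cases h1 : l = "vert"
  · subst h1; decide
  · by_cases h2 : l = "jaune"
    · subst h2; decide
    · by_cases h3 : l = "orange"
      · subst h3; decide
      · by_cases h4 : l = "rouge"
        · subst h4; decide
        · simp [PySem.Dict.getD_eq_get?_getD, PySem.Dict.get?,
                h1, h2, h3, h4, Ne.symm h1, Ne.symm h2, Ne.symm h3, Ne.symm h4]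

-- the fold from each reachable state, characterized by membership of the normalized levels
theorem pvFold_char (alerts : List (List (String × String))) :
    (alerts.foldl pvStep ("rouge", 4) = ("rouge", 4)) ∧
    (alerts.foldl pvStep ("orange", 3) =
      (if "rouge" ∈ alerts.map pvNormLevel then ("rouge", 4) else ("orange", 3))) ∧
    (alerts.foldl pvStep ("jaune", 2) =
      (if "rouge" ∈ alerts.map pvNormLevel then ("rouge", 4)
       else if "orange" ∈ alerts.map pvNormLevel then ("orange", 3) else ("jaune", 2))) ∧
    (alerts.foldl pvStep ("vert", 1) =
      (if "rouge" ∈ alerts.map pvNormLevel then ("rouge", 4)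
       else if "orange" ∈ alerts.map pvNormLevel then ("orange", 3)
       else if "jaune" ∈ alerts.map pvNormLevel then ("jaune", 2) else ("vert", 1))) := by
  induction alerts with
  | nil => simp
  | cons a rest ih =>
    obtain ⟨ih4, ih3, ih2, ih1⟩ := ih
    have hstep : ∀ st : String × Int, pvStep st a =
        (let l := pvNormLevel a
         let sc : Int := if l = "vert" then 1 else if l = "jaune" then 2 else if l = "orange" then 3
            else if l = "rouge" then 4 else 0
         if sc > st.2 then (l, sc) else st) := by
      intro st; simp only [pvStep, pvScore_eq]
    by_cases hr : pvNormLevel a = "rouge"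
    · simp [List.foldl_cons, hstep, hr, ih4]
    · by_cases ho : pvNormLevel a = "orange"
      · simp [List.foldl_cons, hstep, ho, ih4, ih3]
      · by_cases hj : pvNormLevel a = "jaune"
        · simp [List.foldl_cons, hstep, hj, ih4, ih3, ih2]
        · by_cases hv : pvNormLevel a = "vert"
          · simp [List.foldl_cons, hstep, hv, ih4, ih3, ih2, ih1]
          · simp [List.foldl_cons, hstep, hr, ho, hj, hv, ih4, ih3, ih2, ih1,
                  Ne.symm hr, Ne.symm ho, Ne.symm hj]

theorem pvContains_ofList (xs : List String) (x : String) :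
    PySem.Set.contains (PySem.Set.ofList xs) x = decide (x ∈ xs) := by
  simp [PySem.Set.contains, PySem.Set.mem_ofList]

-- ===== VERDICT (by name: the statement is the Claim_ definition above) =====
theorem highest_vigilance_level_py_spec : Claim_equal_highest_vigilance_level_py := by
  intro alerts _
  unfold Spec_highest_vigilance_level_py highest_vigilance_level_py highest_vigilance_level_py_alt
  have h := (pvFold_char alerts).2.2.2
  simp only [pvContains_ofList]
  show (alerts.foldl pvStep ("vert",
      (PySem.Dict.mk [("vert", (1:Int)), ("jaune", 2), ("orange", 3), ("rouge", 4)]).getD "vert" 0)).1 = _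
  rw [show (PySem.Dict.mk [("vert", (1:Int)), ("jaune", 2), ("orange", 3), ("rouge", 4)]).getD "vert" 0
      = 1 from by decide]
  norm_num at h ⊢
  rw [h]
  split_ifs <;> rfl
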